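-- pv_equiv track=rewrite | github.com/nandkishorrathodk-art/Ironcliw-ai | backend/core/supervisor/narrator.py | _simplify_reason
-- ===== SOURCE A (Python) =====
-- def _simplify_reason(reason: str) -> str:
--     """Simplify a technical reason for speech."""
--     if not reason:
--         return "Unknown reason"
--
--     # Truncate long reasons
--     if len(reason) > 100:
--         reason = reason[:97] + "..."
--
--     # Remove technical jargon for cleaner speech
--     replacements = {
--         "pre-flight": "safety check",
--         "timeout": "took too long",
--         "SIGTERM": "shutdown signal",
--         "SIGKILL": "force stop",
--         "OOM": "out of memory",
--         "API": "service",
--         "HTTP": "connection",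
--     }
--
--     for old, new in replacements.items():
--         reason = reason.replace(old, new)
--
--     return reason
-- ===== SOURCE B (Python) =====
-- _TABLE = [
--     ("pre-flight", "safety check"),
--     ("timeout", "took too long"),
--     ("SIGTERM", "shutdown signal"),
--     ("SIGKILL", "force stop"),
--     ("OOM", "out of memory"),
--     ("API", "service"),
--     ("HTTP", "connection"),
-- ]
--
--
-- def _simplify_reason(reason: str) -> str:
--     """Simplify a technical reason for speech (single-pass rewrite)."""
--     if not reason:
--         return "Unknown reason"
--
--     if len(reason) > 100:
--         reason = reason[:97] + "..."
--
--     # One combined left-to-right scan instead of seven replace passes: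
--     # at each position take the first table key that matches, emit its
--     # replacement and jump past the match; otherwise emit the character.
--     out = []
--     i = 0
--     n = len(reason)
--     while i < n:
--         for old, new in _TABLE:
--             if reason.startswith(old, i):
--                 out.append(new)
--                 i += len(old)
--                 break
--         else:
--             out.append(reason[i])
--             i += 1
--     return "".join(out)
-- ===== Notes on version B (the rewrite author's own statement) =====
-- stated objective: alternative
-- what changed: A runs seven sequential str.replace passes (one full scan of the string per table entry); B makes a single left-to-right scan that at each position tries the table keys in order, emits the first matching key's replacement and jumps past it, building the output in one pass.
import Mathlib
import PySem

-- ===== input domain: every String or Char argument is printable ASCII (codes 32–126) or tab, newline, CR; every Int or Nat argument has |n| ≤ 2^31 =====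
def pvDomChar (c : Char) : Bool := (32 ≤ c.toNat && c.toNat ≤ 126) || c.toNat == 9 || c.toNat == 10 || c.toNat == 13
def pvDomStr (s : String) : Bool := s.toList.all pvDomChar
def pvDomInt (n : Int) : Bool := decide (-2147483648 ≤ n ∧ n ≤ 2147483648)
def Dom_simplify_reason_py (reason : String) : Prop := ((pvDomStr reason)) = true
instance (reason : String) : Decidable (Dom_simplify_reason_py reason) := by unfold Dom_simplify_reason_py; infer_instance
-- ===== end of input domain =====

-- B replaces A's seven sequential str.replace passes by ONE left-to-right scan over a
-- replacement table (first matching key at each position wins); same return value everywhere.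

-- ===== PORT A =====
-- the `replacements` dict of A, in insertion order (A iterates .items())
def pvTable : List (String × String) :=
  [("pre-flight", "safety check"),
   ("timeout", "took too long"),
   ("SIGTERM", "shutdown signal"),
   ("SIGKILL", "force stop"),
   ("OOM", "out of memory"),
   ("API", "service"),
   ("HTTP", "connection")]

def simplify_reason_py (reason : String) : String :=
  if reason.toList = [] then "Unknown reason"          -- `if not reason`
  else
    -- `for old, new in replacements.items(): reason = reason.replace(old, new)`
    pvTable.foldl (fun acc p => PySem.Str.replace acc p.1 p.2)
      (if PySem.Str.len reason > 100
       then PySem.Str.slice reason none (some 97) ++ "..."    -- reason[:97] + "..."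
       else reason)

-- ===== PORT B =====
-- B's table, on code points
def pvTableC : List (List Char × List Char) :=
  [("pre-flight".toList, "safety check".toList),
   ("timeout".toList, "took too long".toList),
   ("SIGTERM".toList, "shutdown signal".toList),
   ("SIGKILL".toList, "force stop".toList),
   ("OOM".toList, "out of memory".toList),
   ("API".toList, "service".toList),
   ("HTTP".toList, "connection".toList)]

-- B's while-loop: at position i take the first table key matching there
-- (`reason.startswith(old, i)`), emit its replacement and jump `len(old)` ahead,
-- else emit the character and advance by one.  `t.drop (q.1.length - 1)` is
-- `(c :: t).drop q.1.length` for the (non-empty) table keys.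
def pvScan (tbl : List (List Char × List Char)) : List Char → List Char
  | [] => []
  | c :: t =>
    match tbl.find? (fun q => q.1.isPrefixOf (c :: t)) with
    | some q => q.2 ++ pvScan tbl (t.drop (q.1.length - 1))
    | none => c :: pvScan tbl t
termination_by s => s.length
decreasing_by all_goals (simp only [List.length_drop, List.length_cons]; omega)

def simplify_reason_py_alt (reason : String) : String :=
  if reason.toList = [] then "Unknown reason"
  else
    String.ofList (pvScan pvTableC
      ((if PySem.Str.len reason > 100
        then PySem.Str.slice reason none (some 97) ++ "..."
        else reason).toList))

-- ===== PRECONDITION & SPEC =====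
def Spec_simplify_reason_py (reason : String) (out : String) : Prop := out = simplify_reason_py_alt reason
instance (reason : String) (out : String) : Decidable (Spec_simplify_reason_py reason out) := by unfold Spec_simplify_reason_py; infer_instance

-- ===== CLAIM (what is proved, stated in full; the proofs are below) =====
def Claim_equal_simplify_reason_py : Prop := ∀ (reason : String), Dom_simplify_reason_py reason → Spec_simplify_reason_py reason (simplify_reason_py reason)

-- ===== LEMMAS AND PROOFS =====

lemma pvScan_nil (tbl : List (List Char × List Char)) : pvScan tbl [] = [] := by
  rw [pvScan]

lemma pvScan_cons_some (tbl : List (List Char × List Char)) (c : Char) (t : List Char)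
    (q : List Char × List Char)
    (h : tbl.find? (fun q => q.1.isPrefixOf (c :: t)) = some q) :
    pvScan tbl (c :: t) = q.2 ++ pvScan tbl (t.drop (q.1.length - 1)) := by
  rw [pvScan, h]

lemma pvScan_cons_none (tbl : List (List Char × List Char)) (c : Char) (t : List Char)
    (h : tbl.find? (fun q => q.1.isPrefixOf (c :: t)) = none) :
    pvScan tbl (c :: t) = c :: pvScan tbl t := by
  rw [pvScan, h]

-- two lists with no common extension
abbrev pvIncompat (a b : List Char) : Prop := ¬ a <+: b ∧ ¬ b <+: a

lemma pvPrefix_append_or {a b c : List Char} (h : a <+: b ++ c) : a <+: b ∨ b <+: a := by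
  rcases Nat.le_total a.length b.length with h1 | h1
  · left; exact List.prefix_of_prefix_length_le h (List.prefix_append b c) h1
  · right; exact List.prefix_of_prefix_length_le (List.prefix_append b c) h h1

lemma pvNot_prefix_append {a b : List Char} (h : pvIncompat a b) (c : List Char) :
    ¬ a <+: b ++ c := fun hp => (pvPrefix_append_or hp).elim h.1 h.2

-- a scan walks transparently over a block no table key can match into
lemma pvScan_append_left (tbl : List (List Char × List Char)) (pre w : List Char)
    (h : ∀ q ∈ tbl, ∀ i, i < pre.length → pvIncompat q.1 (pre.drop i)) :
    pvScan tbl (pre ++ w) = pre ++ pvScan tbl w := by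
  induction pre with
  | nil => simp
  | cons x pre' ih =>
    have hnone : tbl.find? (fun q => q.1.isPrefixOf (x :: (pre' ++ w))) = none := by
      refine List.find?_eq_none.mpr (fun q hq => ?_)
      intro hpf
      have hpre : q.1 <+: (x :: pre') ++ w := by
        simpa using (List.isPrefixOf_iff_prefix.mp hpf)
      have h0 := h q hq 0 (by simp only [List.length_cons]; omega)
      simp only [List.drop_zero] at h0
      exact pvNot_prefix_append h0 w hpre
    rw [List.cons_append, pvScan_cons_none _ _ _ hnone,
        ih (fun q hq i hi => by
          have := h q hq (i + 1) (by simp only [List.length_cons]; omega)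
          simpa using this)]
    rfl

-- scanning cannot create a NEW occurrence of a (tail of a) key k in front of untouched input
lemma pvNoCreate (tbl : List (List Char × List Char)) (k : List Char)
    (hC3 : ∀ q ∈ tbl, ∀ i, i < k.length → 0 < i → pvIncompat (k.drop i) q.2) :
    ∀ s, ∀ i, 0 < i → i < k.length → k.drop i <+: pvScan tbl s → k.drop i <+: s := by
  intro s
  induction s with
  | nil =>
    intro i hi hik hp
    rw [pvScan_nil] at hp
    have h1 := List.prefix_nil.mp hp
    have h2 := congrArg List.length h1
    simp at h2
    omega
  | cons c t ih =>
    intro i hi hik hp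
    cases hfind : tbl.find? (fun q => q.1.isPrefixOf (c :: t)) with
    | some q =>
      rw [pvScan_cons_some _ _ _ _ hfind] at hp
      have hq : q ∈ tbl := List.mem_of_find?_eq_some hfind
      exact absurd hp (pvNot_prefix_append (hC3 q hq i hik hi) _)
    | none =>
      rw [pvScan_cons_none _ _ _ hfind] at hp
      have hdrop : k.drop i = k[i] :: k.drop (i + 1) := (List.getElem_cons_drop hik).symm
      rw [hdrop] at hp
      rcases List.cons_prefix_cons.mp hp with ⟨hc, htail⟩
      have htl : k.drop (i + 1) <+: t := by
        by_cases hlen : i + 1 < k.length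
        · exact ih (i + 1) (by omega) hlen htail
        · have : k.drop (i + 1) = [] := List.drop_eq_nil_of_le (by omega)
          simp [this]
      rw [hdrop, hc]
      exact List.cons_prefix_cons.mpr ⟨rfl, htl⟩

-- if neither a table key nor k matches at the head, k does not match the head of the scan output
lemma pvNoHead (tbl : List (List Char × List Char)) (k : List Char) (hk : k ≠ [])
    (hC3 : ∀ q ∈ tbl, ∀ i, i < k.length → 0 < i → pvIncompat (k.drop i) q.2)
    (s : List Char)
    (h0 : tbl.find? (fun q => q.1.isPrefixOf s) = none)
    (hks : ¬ k <+: s) : ¬ k <+: pvScan tbl s := by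
  cases s with
  | nil => rw [pvScan_nil]; intro hp; exact hk (List.prefix_nil.mp hp)
  | cons c t =>
    rw [pvScan_cons_none _ _ _ h0]
    intro hp
    cases k with
    | nil => exact hk rfl
    | cons kh k' =>
      rcases List.cons_prefix_cons.mp hp with ⟨hc, htail⟩
      subst hc
      cases k' with
      | nil => exact hks (List.cons_prefix_cons.mpr ⟨rfl, by simp⟩)
      | cons k1 k2 =>
        have hlen : 1 < (kh :: k1 :: k2).length := by simp
        have := pvNoCreate tbl (kh :: k1 :: k2) hC3 t 1 (by omega) hlen (by simpa using htail)
        exact hks (List.cons_prefix_cons.mpr ⟨rfl, by simpa using this⟩)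

-- FUSION: running one more single-key pass over a finished multi-key scan
-- equals one multi-key scan with that key appended, provided the new key k
-- cannot match inside/across any earlier value (hC1), no earlier key can match
-- inside/across k (hC2), and no tail of k can match into an earlier value (hC3).
lemma pvFuse (tbl : List (List Char × List Char)) (k v : List Char) (hk : k ≠ [])
    (hC1 : ∀ q ∈ tbl, ∀ i, i < q.2.length → pvIncompat k (q.2.drop i))
    (hC2 : ∀ q ∈ tbl, ∀ i, i < k.length → pvIncompat q.1 (k.drop i))
    (hC3 : ∀ q ∈ tbl, ∀ i, i < k.length → 0 < i → pvIncompat (k.drop i) q.2) :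
    ∀ s, pvScan [(k, v)] (pvScan tbl s) = pvScan (tbl ++ [(k, v)]) s := by
  suffices H : ∀ n s, s.length ≤ n → pvScan [(k, v)] (pvScan tbl s) = pvScan (tbl ++ [(k, v)]) s by
    intro s; exact H s.length s le_rfl
  intro n
  induction n with
  | zero =>
    intro s hs
    have : s = [] := List.eq_nil_of_length_eq_zero (by omega)
    subst this; simp [pvScan_nil]
  | succ m ih =>
    intro s hs
    cases s with
    | nil => simp [pvScan_nil]
    | cons c t =>
      cases hfind : tbl.find? (fun q => q.1.isPrefixOf (c :: t)) with
      | some q =>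
        have hq : q ∈ tbl := List.mem_of_find?_eq_some hfind
        have hfind' : (tbl ++ [(k, v)]).find? (fun q => q.1.isPrefixOf (c :: t)) = some q := by
          rw [List.find?_append, hfind]; rfl
        rw [pvScan_cons_some _ _ _ _ hfind, pvScan_cons_some _ _ _ _ hfind',
            pvScan_append_left [(k, v)] q.2 _
              (by intro q' hq' i hi; simp at hq'; subst hq'; exact hC1 q hq i hi),
            ih _ (by simp only [List.length_drop]; simp at hs; omega)]
      | none =>
        by_cases hks : k <+: (c :: t)
        · -- the new key matches here; earlier keys cannot see inside it
          obtain ⟨r, hr⟩ := id hks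
          have hfind' : (tbl ++ [(k, v)]).find? (fun q => q.1.isPrefixOf (c :: t)) = some (k, v) := by
            rw [List.find?_append, hfind]
            simp [List.isPrefixOf_iff_prefix, hks]
          rw [pvScan_cons_some _ _ _ _ hfind']
          cases k with
          | nil => exact absurd rfl hk
          | cons kh k'' =>
            have hc : kh = c := by simpa using congrArg (fun l => l.headD c) hr
            have ht : k'' ++ r = t := by simpa [hc] using congrArg List.tail hr
            have hL : pvScan tbl (c :: t) = (kh :: k'') ++ pvScan tbl r := by
              rw [← hr]
              exact pvScan_append_left tbl (kh :: k'') r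
                (fun q hq i hi => hC2 q hq i hi)
            have hsingle : ([((kh :: k''), v)].find?
                (fun q => q.1.isPrefixOf (kh :: (k'' ++ pvScan tbl r)))) = some ((kh :: k''), v) := by
              have : (kh :: k'').isPrefixOf (kh :: (k'' ++ pvScan tbl r)) = true := by
                simp [List.isPrefixOf_iff_prefix]
              simp [this]
            rw [hL, List.cons_append, pvScan_cons_some _ _ _ _ hsingle]
            simp only
            have hdrop1 : (k'' ++ pvScan tbl r).drop ((kh :: k'').length - 1) = pvScan tbl r := by
              simp
            have hdrop2 : t.drop ((kh :: k'').length - 1) = r := by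
              rw [← ht]; simp
            have hrlen : r.length ≤ m := by
              have := congrArg List.length ht
              simp only [List.length_append] at this
              simp only [List.length_cons] at hs
              omega
            rw [hdrop1, hdrop2, ih r hrlen]
        · -- nothing matches here: both scans copy c
          have hfind' : (tbl ++ [(k, v)]).find? (fun q => q.1.isPrefixOf (c :: t)) = none := by
            rw [List.find?_append, hfind]
            simp [List.isPrefixOf_iff_prefix, hks]
          have hnohead := pvNoHead tbl k hk hC3 (c :: t) hfind hks
          rw [pvScan_cons_none _ _ _ hfind, pvScan_cons_none _ _ _ hfind']
          have hsingle : ([(k, v)].find?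
              (fun q => q.1.isPrefixOf (c :: pvScan tbl t))) = none := by
            simp [List.isPrefixOf_iff_prefix]
            intro hp
            exact absurd (by rw [pvScan_cons_none _ _ _ hfind]; exact hp) hnohead
          rw [pvScan_cons_none _ _ _ hsingle, ih t (by simp at hs; omega)]

-- Python str.replace (non-empty pattern) IS the single-key scan
lemma pvGo_eq (old nw : List Char) (hold : old ≠ []) :
    ∀ fuel l acc, l.length ≤ fuel →
      PySem.Chars.replace.go old nw fuel l acc = acc.reverse ++ pvScan [(old, nw)] l := by
  intro fuel
  induction fuel with
  | zero =>
    intro l acc hl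
    have : l = [] := List.eq_nil_of_length_eq_zero (by omega)
    subst this
    rw [PySem.Chars.replace.go, pvScan_nil]
  | succ m ih =>
    intro l acc hl
    cases l with
    | nil => rw [PySem.Chars.replace.go, pvScan_nil] <;> simp
    | cons c t =>
      rw [PySem.Chars.replace.go]
      by_cases hpf : old.isPrefixOf (c :: t)
      · have hsingle : ([(old, nw)].find? (fun q => q.1.isPrefixOf (c :: t))) = some (old, nw) := by
          simp [hpf]
        rw [if_pos hpf, pvScan_cons_some _ _ _ _ hsingle]
        have hlen : 1 ≤ old.length := by cases old with | nil => exact absurd rfl hold | cons _ _ => simp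
        have hdrop : List.drop old.length (c :: t) = t.drop (old.length - 1) := by
          cases old with
          | nil => exact absurd rfl hold
          | cons oh ot => simp
        rw [hdrop, ih _ _ (by simp only [List.length_drop]; simp at hl; omega)]
        simp
      · have hsingle : ([(old, nw)].find? (fun q => q.1.isPrefixOf (c :: t))) = none := by
          simp [hpf]
        rw [if_neg hpf, pvScan_cons_none _ _ _ hsingle, ih _ _ (by simp at hl; omega)]
        simp

lemma pvReplace_eq (s old nw : List Char) (hold : old ≠ []) :
    PySem.Chars.replace s old nw = pvScan [(old, nw)] s := by
  unfold PySem.Chars.replace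
  rw [if_neg (by simpa using hold), pvGo_eq old nw hold s.length s [] le_rfl]
  simp

-- seven sequential replaces = one combined scan, on code points
lemma pvCharsEq (s : List Char) :
    PySem.Chars.replace (PySem.Chars.replace (PySem.Chars.replace (PySem.Chars.replace
      (PySem.Chars.replace (PySem.Chars.replace (PySem.Chars.replace s
        "pre-flight".toList "safety check".toList)
        "timeout".toList "took too long".toList)
        "SIGTERM".toList "shutdown signal".toList)
        "SIGKILL".toList "force stop".toList)
        "OOM".toList "out of memory".toList)
        "API".toList "service".toList)
        "HTTP".toList "connection".toList
    = pvScan pvTableC s := by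
  rw [pvReplace_eq _ _ _ (by decide), pvReplace_eq _ _ _ (by decide),
      pvReplace_eq _ _ _ (by decide), pvReplace_eq _ _ _ (by decide),
      pvReplace_eq _ _ _ (by decide), pvReplace_eq _ _ _ (by decide),
      pvReplace_eq _ _ _ (by decide)]
  rw [pvFuse _ _ _ (by decide) (by decide) (by decide) (by decide) s]
  simp only [List.cons_append, List.nil_append]
  rw [pvFuse _ _ _ (by decide) (by decide) (by decide) (by decide) s]
  simp only [List.cons_append, List.nil_append]
  rw [pvFuse _ _ _ (by decide) (by decide) (by decide) (by decide) s]
  simp only [List.cons_append, List.nil_append]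
  rw [pvFuse _ _ _ (by decide) (by decide) (by decide) (by decide) s]
  simp only [List.cons_append, List.nil_append]
  rw [pvFuse _ _ _ (by decide) (by decide) (by decide) (by decide) s]
  simp only [List.cons_append, List.nil_append]
  rw [pvFuse _ _ _ (by decide) (by decide) (by decide) (by decide) s]
  simp only [List.cons_append, List.nil_append]
  rfl

lemma pvAllRepl (r : String) :
    pvTable.foldl (fun acc p => PySem.Str.replace acc p.1 p.2) r
      = String.ofList (pvScan pvTableC r.toList) := by
  simp only [pvTable, List.foldl_cons, List.foldl_nil, PySem.Str.replace, String.toList_ofList]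
  exact congrArg String.ofList (pvCharsEq r.toList)

-- ===== VERDICT (by name: the statement is the Claim_ definition above) =====
theorem simplify_reason_py_spec : Claim_equal_simplify_reason_py := by
  intro reason _
  unfold Spec_simplify_reason_py simplify_reason_py simplify_reason_py_alt
  by_cases h : reason.toList = []
  · rw [if_pos h, if_pos h]
  · rw [if_neg h, if_neg h, pvAllRepl]
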